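-- pv_equiv track=rewrite | github.com/MaksimChmirkov/Algorithm_2024 | python/src/module3/zad_3.py | find_max_concatenated_string
-- ===== SOURCE A (Python) =====
-- def compute_z_function(s):
--     n = len(s)
--     z = [0] * n
--     l, r = 0, 0
--     for i in range(1, n):
--         if i <= r:
--             z[i] = min(r - i + 1, z[i - l])
--         while i + z[i] < n and s[z[i]] == s[i + z[i]]:
--             z[i] += 1
--         if i + z[i] - 1 > r:
--             l, r = i, i + z[i] - 1
--     return z
--
-- def find_max_concatenated_string(s):
--     z = compute_z_function(s)
--     n = len(s)
--     max_k = 1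
--     for i in range(1, n):
--         if i + z[i] == n and n % i == 0:
--             max_k = max(max_k, n // i)
--     return max_k
-- ===== SOURCE B (Python) =====
-- def find_max_concatenated_string(s):
--     n = len(s)
--     max_k = 1
--     for i in range(1, n):
--         if n % i == 0 and s[:i] * (n // i) == s:
--             max_k = max(max_k, n // i)
--     return max_k
-- ===== Notes on version B (the rewrite author's own statement) =====
-- stated objective: simpler
-- what changed: Replaced the Z-function pass by a direct test of each candidate period: for every divisor i of n, check whether s[:i] repeated n//i times reconstructs s.
import Mathlib
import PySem

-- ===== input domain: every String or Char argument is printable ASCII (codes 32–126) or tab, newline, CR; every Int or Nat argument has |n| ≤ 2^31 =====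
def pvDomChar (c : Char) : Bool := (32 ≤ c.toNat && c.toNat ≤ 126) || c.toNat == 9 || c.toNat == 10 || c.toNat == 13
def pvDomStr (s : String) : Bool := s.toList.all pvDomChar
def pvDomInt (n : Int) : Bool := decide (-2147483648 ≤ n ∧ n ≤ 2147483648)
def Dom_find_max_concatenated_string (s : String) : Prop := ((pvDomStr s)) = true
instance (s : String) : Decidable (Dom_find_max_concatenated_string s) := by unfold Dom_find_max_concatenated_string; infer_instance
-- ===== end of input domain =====

-- B replaces A's Z-function pass by directly testing, for each divisor i of n, whether
-- s[:i] repeated n//i times reconstructs s (simpler: no auxiliary array or two-pointer window).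

-- ===== PORT A =====
-- the inner `while i + z[i] < n and s[z[i]] == s[i + z[i]]: z[i] += 1` loop
def zwhile (cs : List Char) (i k : Nat) : Nat :=
  if h : i + k < cs.length ∧ cs.getD k ' ' = cs.getD (i + k) ' ' then
    zwhile cs i (k + 1)
  else k
termination_by cs.length - (i + k)
decreasing_by omega

-- one iteration of the `for i in range(1, n)` loop of compute_z_function, state (z, l, r)
def zstep (cs : List Char) (st : List Nat × Nat × Nat) (i : Nat) : List Nat × Nat × Nat :=
  let z := st.1; let l := st.2.1; let r := st.2.2
  let k0 := if i ≤ r then min (r - i + 1) (z.getD (i - l) 0) else 0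
  let k := zwhile cs i k0
  let z' := z.set i k
  if i + k - 1 > r then (z', i, i + k - 1) else (z', l, r)

def compute_z_function (cs : List Char) : List Nat :=
  ((List.range' 1 (cs.length - 1)).foldl (zstep cs) (List.replicate cs.length 0, 0, 0)).1

def find_max_concatenated_string (s : String) : Int :=
  let cs := s.toList
  let z := compute_z_function cs
  let n := cs.length
  ((List.range' 1 (n - 1)).foldl
    (fun mk i => if i + z.getD i 0 = n ∧ n % i = 0 then max mk (n / i) else mk) 1 : Nat)

-- ===== PORT B =====
def find_max_concatenated_string_alt (s : String) : Int :=
  let cs := s.toList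
  let n := cs.length
  ((List.range' 1 (n - 1)).foldl
    (fun mk i =>
      if n % i = 0 ∧ (List.replicate (n / i) (cs.take i)).flatten = cs then max mk (n / i)
      else mk) 1 : Nat)

-- ===== PRECONDITION & SPEC =====
def Spec_find_max_concatenated_string (s : String) (out : Int) : Prop := out = find_max_concatenated_string_alt s
instance (s : String) (out : Int) : Decidable (Spec_find_max_concatenated_string s out) := by unfold Spec_find_max_concatenated_string; infer_instance

-- ===== CLAIM (what is proved, stated in full; the proofs are below) =====
def Claim_equal_find_max_concatenated_string : Prop := ∀ (s : String), Dom_find_max_concatenated_string s → Spec_find_max_concatenated_string s (find_max_concatenated_string s)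

-- ===== LEMMAS AND PROOFS =====

-- `MatchP cs i k`: the first k characters of cs match cs shifted by i
def MatchP (cs : List Char) (i k : Nat) : Prop :=
  ∀ j, j < k → cs.getD j ' ' = cs.getD (i + j) ' '

-- partial correctness of a finished z-entry: in range, matching, and maximal-or-at-end
def GoodZ (cs : List Char) (i k : Nat) : Prop :=
  i + k ≤ cs.length ∧ MatchP cs i k ∧
    (i + k = cs.length ∨ cs.getD k ' ' ≠ cs.getD (i + k) ' ')

lemma zwhile_good (cs : List Char) (i : Nat) :
    ∀ k, i + k ≤ cs.length → MatchP cs i k → GoodZ cs i (zwhile cs i k) := by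
  intro k
  fun_induction zwhile cs i k with
  | case1 k h ih =>
    intro _ hm
    exact ih (by omega) (fun j hj => by
      rcases Nat.lt_succ_iff_lt_or_eq.mp hj with hj | hj
      · exact hm j hj
      · subst hj; exact h.2)
  | case2 k h =>
    intro h1 hm
    refine ⟨h1, hm, ?_⟩
    rw [not_and_or] at h
    rcases h with h | h
    · exact Or.inl (by omega)
    · exact Or.inr h

def InvZ (cs : List Char) (z : List Nat) (i : Nat) : Prop :=
  ∀ j, 1 ≤ j → j < i → GoodZ cs j (z.getD j 0)

def InvS (cs : List Char) (i : Nat) (st : List Nat × Nat × Nat) : Prop :=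
  st.1.length = cs.length ∧ InvZ cs st.1 i ∧ st.2.1 < i ∧ st.2.2 < cs.length ∧
  (st.2.1 = 0 → st.2.2 = 0) ∧
  (1 ≤ st.2.1 → st.2.1 ≤ st.2.2 →
    ∀ j, j ≤ st.2.2 - st.2.1 → cs.getD j ' ' = cs.getD (st.2.1 + j) ' ')

lemma zstep_inv (cs : List Char) (st : List Nat × Nat × Nat) (i : Nat)
    (hInv : InvS cs i st) (hi1 : 1 ≤ i) (hin : i < cs.length) :
    InvS cs (i + 1) (zstep cs st i) := by
  obtain ⟨z, l, r⟩ := st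
  obtain ⟨hlen, hz, hl, hr, hl0, hlr⟩ := hInv
  simp only at hlen hz hl hr hl0 hlr
  set n := cs.length with hn
  set k0 := if i ≤ r then min (r - i + 1) (z.getD (i - l) 0) else 0 with hk0def
  have hk0 : i + k0 ≤ n ∧ MatchP cs i k0 := by
    rw [hk0def]
    split_ifs with hir
    · have hl1 : 1 ≤ l := by
        by_contra hc
        have : l = 0 := by omega
        have := hl0 this
        omega
      obtain ⟨hg1, hg2, _⟩ := hz (i - l) (by omega) (by omega)
      constructor
      · have := min_le_left (r - i + 1) (z.getD (i - l) 0)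
        omega
      · intro j hj
        have hj1 : j < z.getD (i - l) 0 := lt_of_lt_of_le hj (min_le_right _ _)
        have hj2 : j ≤ r - i := by
          have := lt_of_lt_of_le hj (min_le_left _ _); omega
        have e1 : cs.getD j ' ' = cs.getD (i - l + j) ' ' := hg2 j hj1
        have e2 : cs.getD (i - l + j) ' ' = cs.getD (l + (i - l + j)) ' ' :=
          hlr hl1 (by omega) (i - l + j) (by omega)
        have e3 : l + (i - l + j) = i + j := by omega
        rw [e1, e2, e3]
    · exact ⟨by omega, fun j hj => absurd hj (by omega)⟩
  have hGood : GoodZ cs i (zwhile cs i k0) := zwhile_good cs i k0 hk0.1 hk0.2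
  set k := zwhile cs i k0 with hkdef
  have hzget : ∀ j, j < i → (z.set i k).getD j 0 = z.getD j 0 := by
    intro j hj
    simp [List.getD, List.getElem?_set_ne (by omega : i ≠ j)]
  have hzgeti : (z.set i k).getD i 0 = k := by
    simp [List.getD, hlen, hin]
  have hInvZ' : InvZ cs (z.set i k) (i + 1) := by
    intro j hj1 hj2
    by_cases hji : j = i
    · subst hji; rw [hzgeti]; exact hGood
    · rw [hzget j (by omega)]; exact hz j hj1 (by omega)
  have hlen' : (z.set i k).length = n := by simp [hlen]
  show InvS cs (i + 1) (if i + k - 1 > r then (z.set i k, i, i + k - 1) else (z.set i k, l, r))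
  split_ifs with hupd
  · refine ⟨hlen', hInvZ', ?_, ?_, ?_, ?_⟩
    · show i < i + 1
      omega
    · show i + k - 1 < n
      have := hGood.1; omega
    · show i = 0 → i + k - 1 = 0
      omega
    · show 1 ≤ i → i ≤ i + k - 1 → ∀ j, j ≤ i + k - 1 - i → cs.getD j ' ' = cs.getD (i + j) ' '
      intro _ hle j hj
      exact hGood.2.1 j (by omega)
  · exact ⟨hlen', hInvZ', Nat.lt_succ_of_lt hl, hr, hl0, hlr⟩

lemma fold_inv (cs : List Char) (m : Nat) (hm : m < cs.length) :
    InvS cs (1 + m) ((List.range' 1 m).foldl (zstep cs) (List.replicate cs.length 0, 0, 0)) := by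
  induction m with
  | zero =>
    simp only [List.range'_zero, List.foldl_nil]
    refine ⟨by simp, fun j hj1 hj2 => by omega, ?_, ?_, ?_, ?_⟩
    · show 0 < 1; omega
    · show 0 < cs.length; omega
    · show (0 : Nat) = 0 → (0 : Nat) = 0; intro _; rfl
    · show 1 ≤ 0 → _; intro h; omega
  | succ m ih =>
    rw [List.range'_concat, List.foldl_append]
    have hst := ih (by omega)
    have := zstep_inv cs _ (1 + m) hst (by omega) (by omega)
    have e : 1 + m + 1 = 1 + (m + 1) := by omega
    rw [e] at this
    simpa using this

lemma computeZ_good (cs : List Char) (i : Nat) (h1 : 1 ≤ i) (h2 : i < cs.length) :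
    GoodZ cs i ((compute_z_function cs).getD i 0) := by
  unfold compute_z_function
  have := fold_inv cs (cs.length - 1) (by omega)
  exact this.2.1 i h1 (by omega)

lemma period_matches (cs : List Char) (i : Nat) (hi : i ≤ cs.length)
    (hp : cs.drop i = cs.take (cs.length - i)) (j : Nat) (hj : i + j < cs.length) :
    cs.getD j ' ' = cs.getD (i + j) ' ' := by
  have hj' : j < cs.length - i := by omega
  have e1 : cs.getD (i + j) ' ' = cs[i + j] := List.getD_eq_getElem cs ' ' hj
  have e2 : cs.getD j ' ' = cs[j] := List.getD_eq_getElem cs ' ' (by omega)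
  rw [e1, e2]
  have h3 : (cs.drop i)[j]'(by simp; omega) = cs[i + j] := by
    simp [List.getElem_drop]
  have h4 : (cs.take (cs.length - i))[j]'(by simp; omega) = cs[j] := by
    simp [List.getElem_take]
  rw [← h3, ← h4]
  congr 1
  exact hp.symm

lemma flatten_replicate_len (q : Nat) (u : List Char) :
    ((List.replicate q u).flatten).length = q * u.length := by
  induction q with
  | zero => simp
  | succ q ih => simp [List.replicate_succ, ih, Nat.succ_mul]; ring

lemma period_flatten_aux :
    ∀ (q : Nat) (cs : List Char) (i : Nat), 1 ≤ i → cs.length = q * i →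
      cs.drop i = cs.take (cs.length - i) →
      (List.replicate q (cs.take i)).flatten = cs := by
  intro q
  induction q with
  | zero =>
    intro cs i _ hlen _
    have hnil : cs = [] := List.eq_nil_of_length_eq_zero (by simpa using hlen)
    subst hnil
    simp
  | succ q ih =>
    intro cs i h1 hlen hp
    have hmul : cs.length = q * i + i := by rw [hlen, Nat.succ_mul]
    by_cases hq : q = 0
    · subst hq
      simp only [List.replicate_succ, List.replicate_zero, List.flatten_cons,
        List.flatten_nil, List.append_nil]
      exact List.take_of_length_le (by omega)
    · have hile : i ≤ cs.length - i := by
        have : 1 * i ≤ q * i := Nat.mul_le_mul_right i (by omega)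
        omega
      have hlen' : (cs.drop i).length = q * i := by simp [hmul]
      have htake : (cs.drop i).take i = cs.take i := by
        rw [hp, List.take_take]
        congr 1
        omega
      have hp' : (cs.drop i).drop i = (cs.drop i).take ((cs.drop i).length - i) := by
        conv_lhs => rw [hp]
        rw [List.drop_take]
        rw [hlen']
        congr 1
        omega
      have hrec := ih (cs.drop i) i h1 hlen' hp'
      rw [htake] at hrec
      calc (List.replicate (q + 1) (cs.take i)).flatten
          = cs.take i ++ (List.replicate q (cs.take i)).flatten := by
            simp [List.replicate_succ]
        _ = cs.take i ++ cs.drop i := by rw [hrec]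
        _ = cs := List.take_append_drop i cs

lemma flatten_period (cs : List Char) (i : Nat) (h1 : 1 ≤ i) (hi : i < cs.length)
    (hdvd : i ∣ cs.length)
    (hf : (List.replicate (cs.length / i) (cs.take i)).flatten = cs) :
    cs.drop i = cs.take (cs.length - i) := by
  set n := cs.length with hn
  set q := n / i with hq
  have hqi : q * i = n := Nat.div_mul_cancel hdvd
  have hq1 : 1 ≤ q := by
    rcases Nat.eq_zero_or_pos q with h | h
    · rw [h] at hqi; simp at hqi; omega
    · exact h
  have hu : (cs.take i).length = i := by simp; omega
  have hqsub : q - 1 + 1 = q := by omega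
  have hflatlen : ((List.replicate (q - 1) (cs.take i)).flatten).length = (q - 1) * i := by
    rw [flatten_replicate_len, hu]
  have hsplit : (List.replicate q (cs.take i)).flatten
      = cs.take i ++ (List.replicate (q - 1) (cs.take i)).flatten := by
    conv_lhs => rw [← hqsub]
    simp [List.replicate_succ]
  have hsplit' : (List.replicate q (cs.take i)).flatten
      = (List.replicate (q - 1) (cs.take i)).flatten ++ cs.take i := by
    conv_lhs => rw [← hqsub]
    rw [List.replicate_succ']
    simp
  have hdrop : cs.drop i = (List.replicate (q - 1) (cs.take i)).flatten := by
    conv_lhs => rw [← hf]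
    rw [hsplit]
    exact List.drop_left' hu
  have htk : cs.take (n - i) = (List.replicate (q - 1) (cs.take i)).flatten := by
    conv_lhs => rw [← hf]
    rw [hsplit']
    have h5 : (q - 1) * i = q * i - i := Nat.sub_one_mul q i
    have : n - i = (q - 1) * i := by rw [h5, hqi]
    rw [this]
    exact List.take_left' hflatlen
  rw [hdrop, htk]

lemma cond_iff (cs : List Char) (i : Nat) (h1 : 1 ≤ i) (h2 : i < cs.length)
    (hd : cs.length % i = 0) :
    (i + (compute_z_function cs).getD i 0 = cs.length) ↔
      (List.replicate (cs.length / i) (cs.take i)).flatten = cs := by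
  have hdvd : i ∣ cs.length := Nat.dvd_of_mod_eq_zero hd
  obtain ⟨hg1, hg2, hg3⟩ := computeZ_good cs i h1 h2
  set zi := (compute_z_function cs).getD i 0 with hzi
  constructor
  · intro hend
    have hper : cs.drop i = cs.take (cs.length - i) := by
      apply List.ext_getElem
      · simp only [List.length_drop, List.length_take]; omega
      · intro j hja hjb
        have hj : j < cs.length - i := by simp at hja; omega
        have e := hg2 j (by omega)
        rw [List.getD_eq_getElem cs ' ' (by omega : j < cs.length),
            List.getD_eq_getElem cs ' ' (by omega : i + j < cs.length)] at e
        simp only [List.getElem_drop, List.getElem_take]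
        exact e.symm
    exact period_flatten_aux (cs.length / i) cs i h1
      ((Nat.div_mul_cancel hdvd).symm) hper
  · intro hf
    have hper := flatten_period cs i h1 h2 hdvd hf
    rcases hg3 with h | h
    · exact h
    · by_contra hne
      have hlt : i + zi < cs.length := by omega
      exact h (period_matches cs i (by omega) hper zi hlt)

-- ===== VERDICT (by name: the statement is the Claim_ definition above) =====
theorem find_max_concatenated_string_spec : Claim_equal_find_max_concatenated_string := by
  intro s _
  unfold Spec_find_max_concatenated_string find_max_concatenated_string find_max_concatenated_string_alt
  simp only
  congr 1
  apply PySem.List.foldl_congr_mem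
  intro acc i hmem
  rw [List.mem_range'_1] at hmem
  have h1 : 1 ≤ i := hmem.1
  have h2 : i < s.toList.length := by omega
  by_cases hd : s.toList.length % i = 0
  · have hiff := cond_iff s.toList i h1 h2 hd
    by_cases hA : i + (compute_z_function s.toList).getD i 0 = s.toList.length
    · rw [if_pos ⟨hA, hd⟩, if_pos ⟨hd, hiff.mp hA⟩]
    · rw [if_neg (fun hc => hA hc.1), if_neg (fun hc => hA (hiff.mpr hc.2))]
  · rw [if_neg (fun hc => hd hc.2), if_neg (fun hc => hd hc.1)]
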